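-- pv_equiv track=rewrite | github.com/Arafat245/6mw | temporary_experiments/step4_fw_perbout_features.py | fw_get_bouts
-- ===== SOURCE A (Python) =====
-- def fw_get_bouts(wi, fs, min_bout_sec=10):
--     """Convert per-second walking indication to bout sample indices, min 10s."""
--     sec = int(fs)
--     bouts = []
--     in_b, bs = False, 0
--     for s in range(len(wi)):
--         if wi[s] and not in_b:
--             bs = s; in_b = True
--         elif not wi[s] and in_b:
--             if s - bs >= min_bout_sec:
--                 bouts.append((bs * sec, s * sec))
--             in_b = False
--     if in_b and len(wi) - bs >= min_bout_sec:
--         bouts.append((bs * sec, len(wi) * sec))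
--     return bouts
-- ===== SOURCE B (Python) =====
-- def fw_get_bouts(wi, fs, min_bout_sec=10):
--     """Convert per-second walking indication to bout sample indices, min 10s."""
--     sec = int(fs)
--     # Pass 1: run-length encode the truthiness of wi.
--     runs = []  # list of [flag, length], maximal runs
--     for x in wi:
--         f = bool(x)
--         if runs and runs[-1][0] == f:
--             runs[-1][1] += 1
--         else:
--             runs.append([f, 1])
--     # Pass 2: emit one bout per sufficiently long truthy run.
--     bouts = []
--     s = 0
--     for f, L in runs:
--         if f and L >= min_bout_sec:
--             bouts.append((s * sec, (s + L) * sec))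
--         s += L
--     return bouts
-- ===== Notes on version B (the rewrite author's own statement) =====
-- stated objective: alternative
-- what changed: Replaced the stateful in_b/bs flag scan (with a special post-loop tail case) by a two-pass run-length-encoding decomposition: group wi into maximal runs of equal truthiness, then emit one bout per truthy run of length >= min_bout_sec, handling the final run uniformly.
import Mathlib
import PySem

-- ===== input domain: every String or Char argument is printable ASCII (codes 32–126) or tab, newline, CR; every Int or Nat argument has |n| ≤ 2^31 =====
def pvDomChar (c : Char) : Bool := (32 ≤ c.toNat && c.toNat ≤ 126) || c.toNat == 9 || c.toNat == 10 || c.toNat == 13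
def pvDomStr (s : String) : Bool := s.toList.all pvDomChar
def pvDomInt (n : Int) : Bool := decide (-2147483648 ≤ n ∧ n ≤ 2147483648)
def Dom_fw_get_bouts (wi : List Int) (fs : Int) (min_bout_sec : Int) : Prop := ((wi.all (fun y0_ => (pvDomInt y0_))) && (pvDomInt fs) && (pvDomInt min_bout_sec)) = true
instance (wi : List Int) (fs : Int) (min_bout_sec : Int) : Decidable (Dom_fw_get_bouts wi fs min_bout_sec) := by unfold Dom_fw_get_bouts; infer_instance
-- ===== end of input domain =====

-- B replaces A's stateful in_b/bs flag scan by a two-pass run-length-encoding decomposition (alternative, same cost).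


-- ===== PORT A =====
-- the for-loop: state (bouts, in_b, bs), s the running index (s counts positions, wi[s] is the head)
def fwGoA (mn sec : Int) : List (Int × Int) × Bool × Int → Int → List Int → List (Int × Int) × Bool × Int
  | (bouts, in_b, bs), _, [] => (bouts, in_b, bs)
  | (bouts, in_b, bs), s, x :: r =>
    if (x != 0) && !in_b then fwGoA mn sec (bouts, true, s) (s + 1) r
    else if (x == 0) && in_b then
      fwGoA mn sec ((if s - bs ≥ mn then bouts ++ [(bs * sec, s * sec)] else bouts), false, bs) (s + 1) r
    else fwGoA mn sec (bouts, in_b, bs) (s + 1) r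

def fw_get_bouts (wi : List Int) (fs : Int) (min_bout_sec : Int) : List (Int × Int) :=
  let sec := fs
  let r := fwGoA min_bout_sec sec ([], false, 0) 0 wi
  if r.2.1 && decide ((wi.length : Int) - r.2.2 ≥ min_bout_sec) then
    r.1 ++ [(r.2.2 * sec, (wi.length : Int) * sec)]
  else r.1

-- ===== PORT B =====
-- pass 1 of Source B; acc holds the runs built so far in REVERSED order, so Python's runs[-1] is acc's head (exact)
def fwBuildRuns : List Int → List (Bool × Int) → List (Bool × Int)
  | [], acc => acc.reverse
  | x :: r, acc =>
    match acc with
    | (g, l) :: tl => if g == decide (x ≠ 0) then fwBuildRuns r ((g, l + 1) :: tl)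
                      else fwBuildRuns r ((decide (x ≠ 0), 1) :: (g, l) :: tl)
    | [] => fwBuildRuns r [(decide (x ≠ 0), 1)]

-- pass 2 of Source B: emit one bout per long-enough truthy run, threading the sample offset s
def fwEmit (sec mn : Int) : Int → List (Bool × Int) → List (Int × Int)
  | _, [] => []
  | s, (f, l) :: rs =>
    (if f && decide (l ≥ mn) then [(s * sec, (s + l) * sec)] else []) ++ fwEmit sec mn (s + l) rs

def fw_get_bouts_alt (wi : List Int) (fs : Int) (min_bout_sec : Int) : List (Int × Int) :=
  let sec := fs
  fwEmit sec min_bout_sec 0 (fwBuildRuns wi [])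

-- ===== PRECONDITION & SPEC =====
def Spec_fw_get_bouts (wi : List Int) (fs : Int) (min_bout_sec : Int) (out : List (Int × Int)) : Prop := out = fw_get_bouts_alt wi fs min_bout_sec
instance (wi : List Int) (fs : Int) (min_bout_sec : Int) (out : List (Int × Int)) : Decidable (Spec_fw_get_bouts wi fs min_bout_sec out) := by unfold Spec_fw_get_bouts; infer_instance

-- ===== CLAIM (what is proved, stated in full; the proofs are below) =====
def Claim_equal_fw_get_bouts : Prop := ∀ (wi : List Int) (fs : Int) (min_bout_sec : Int), Dom_fw_get_bouts wi fs min_bout_sec → Spec_fw_get_bouts wi fs min_bout_sec (fw_get_bouts wi fs min_bout_sec)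

-- ===== LEMMAS AND PROOFS =====

-- front-recursive run-length encoding (proof-side reference form of pass 1)
def fwConsRun : Bool × Int → List (Bool × Int) → List (Bool × Int)
  | (f, l), (g, m) :: tl => if g == f then (g, m + l) :: tl else (f, l) :: (g, m) :: tl
  | (f, l), [] => [(f, l)]

def fwRunsF : List Int → List (Bool × Int)
  | [] => []
  | x :: r => fwConsRun (decide (x ≠ 0), 1) (fwRunsF r)

-- A's loop + tail clause fused, with the end marker e explicit (proof-side reference form of A)
def fwFinA (mn sec e : Int) : List Int → Bool → Int → Int → List (Int × Int)
  | [], in_b, bs, _ => if in_b && decide (e - bs ≥ mn) then [(bs * sec, e * sec)] else []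
  | x :: r, in_b, bs, s =>
    if (x != 0) && !in_b then fwFinA mn sec e r true s (s + 1)
    else if (x == 0) && in_b then
      (if s - bs ≥ mn then [(bs * sec, s * sec)] else []) ++ fwFinA mn sec e r false bs (s + 1)
    else fwFinA mn sec e r in_b bs (s + 1)

theorem fwConsRun_merge (g : Bool) (l : Int) (rs : List (Bool × Int)) :
    fwConsRun (g, l) (fwConsRun (g, 1) rs) = fwConsRun (g, l + 1) rs := by
  match rs with
  | [] => simp [fwConsRun]; ring
  | (h, m) :: tl =>
    by_cases hg : h = g
    · subst hg; simp [fwConsRun]; ring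
    · have h1 : (h == g) = false := by simp [hg]
      simp [fwConsRun, h1]; ring

theorem fwConsRun_true_after_false (l : Int) (rs : List (Bool × Int)) :
    fwConsRun (true, l) (fwConsRun (false, 1) rs) = (true, l) :: fwConsRun (false, 1) rs := by
  cases rs with
  | nil => simp [fwConsRun]
  | cons p tl => obtain ⟨h, m⟩ := p; cases h <;> simp [fwConsRun]

theorem fwBuildRuns_eq (wi : List Int) : ∀ (g : Bool) (l : Int) (tl : List (Bool × Int)),
    fwBuildRuns wi ((g, l) :: tl) = tl.reverse ++ fwConsRun (g, l) (fwRunsF wi) := by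
  induction wi with
  | nil => intro g l tl; simp [fwBuildRuns, fwConsRun, fwRunsF]
  | cons x r ih =>
    intro g l tl
    simp only [fwBuildRuns, fwRunsF]
    generalize decide (x ≠ 0) = f
    cases hgf : (g == f) with
    | true =>
      have hg : g = f := by simpa using hgf
      simp only [if_true]
      rw [ih, ← hg, fwConsRun_merge]
    | false =>
      have hg : g ≠ f := by simpa using hgf
      simp only [Bool.false_eq_true, if_false]
      rw [ih f 1 ((g, l) :: tl)]
      cases hrs : fwRunsF r with
      | nil => simp [fwConsRun, Ne.symm hg]
      | cons p tl' =>
        obtain ⟨h, m⟩ := p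
        by_cases hh : h = f
        · subst hh; simp [fwConsRun, Ne.symm hg]
        · simp [fwConsRun, hh, Ne.symm hg]

theorem fwBuildRuns_nil (wi : List Int) : fwBuildRuns wi [] = fwRunsF wi := by
  cases wi with
  | nil => simp [fwBuildRuns, fwRunsF]
  | cons x r => rw [fwBuildRuns, fwBuildRuns_eq, fwRunsF]; simp

theorem fwEmit_false (sec mn : Int) (rs : List (Bool × Int)) (s : Int) :
    fwEmit sec mn s (fwConsRun (false, 1) rs) = fwEmit sec mn (s + 1) rs := by
  cases rs with
  | nil => simp [fwConsRun, fwEmit]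
  | cons p tl =>
    obtain ⟨h, m⟩ := p
    cases h
    · have : s + (m + 1) = s + 1 + m := by ring
      simp [fwConsRun, fwEmit, this]
    · simp [fwConsRun, fwEmit]

theorem fwGoA_acc (mn sec : Int) (wi : List Int) : ∀ (bouts : List (Int × Int)) (in_b : Bool) (bs s : Int),
    fwGoA mn sec (bouts, in_b, bs) s wi =
      (bouts ++ (fwGoA mn sec ([], in_b, bs) s wi).1, (fwGoA mn sec ([], in_b, bs) s wi).2) := by
  induction wi with
  | nil => intro bouts in_b bs s; simp [fwGoA]
  | cons x r ih =>
    intro bouts in_b bs s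
    by_cases hx : x = 0 <;> cases in_b
    · simp only [fwGoA]; simp [hx]; exact ih bouts false bs (s + 1)
    · simp only [fwGoA]; simp [hx]
      split
      · rw [ih (bouts ++ [(bs * sec, s * sec)]) false bs (s + 1),
            ih [(bs * sec, s * sec)] false bs (s + 1)]
        simp
      · exact ih bouts false bs (s + 1)
    · simp only [fwGoA]; simp [hx]; exact ih bouts true s (s + 1)
    · simp only [fwGoA]; simp [hx]; exact ih bouts true bs (s + 1)

theorem fwFinA_of_goA (mn sec : Int) (wi : List Int) : ∀ (in_b : Bool) (bs s e : Int),
    (fwGoA mn sec ([], in_b, bs) s wi).1 ++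
      (if (fwGoA mn sec ([], in_b, bs) s wi).2.1 && decide (e - (fwGoA mn sec ([], in_b, bs) s wi).2.2 ≥ mn)
        then [((fwGoA mn sec ([], in_b, bs) s wi).2.2 * sec, e * sec)] else []) =
      fwFinA mn sec e wi in_b bs s := by
  induction wi with
  | nil => intro in_b bs s e; simp [fwGoA, fwFinA]
  | cons x r ih =>
    intro in_b bs s e
    by_cases hx : x = 0 <;> cases in_b
    · -- x = 0, in_b = false : no-op branch
      have H := ih false bs (s + 1) e
      simp [fwGoA, fwFinA, hx] at H ⊢
      exact H
    · -- x = 0, in_b = true : close-bout branch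
      simp only [fwGoA, fwFinA]
      simp [hx]
      rw [fwGoA_acc]
      simp only [List.append_assoc]
      congr 1
      simpa using ih false bs (s + 1) e
    · -- x ≠ 0, in_b = false : open-bout branch
      have H := ih true s (s + 1) e
      simp [fwGoA, fwFinA, hx] at H ⊢
      exact H
    · -- x ≠ 0, in_b = true : no-op branch
      have H := ih true bs (s + 1) e
      simp [fwGoA, fwFinA, hx] at H ⊢
      exact H

theorem fwFinA_emit (mn sec : Int) (wi : List Int) : ∀ (in_b : Bool) (bs s e : Int),
    e = s + (wi.length : Int) →
    fwFinA mn sec e wi in_b bs s =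
      if in_b then fwEmit sec mn bs (fwConsRun (true, s - bs) (fwRunsF wi))
      else fwEmit sec mn s (fwRunsF wi) := by
  induction wi with
  | nil =>
    intro in_b bs s e he
    have hes : e = s := by simpa using he
    cases in_b
    · simp [fwFinA, fwRunsF, fwEmit]
    · have h1 : bs + (s - bs) = s := by ring
      simp [fwFinA, fwRunsF, fwConsRun, fwEmit, hes, h1]
  | cons x r ih =>
    intro in_b bs s e he
    have he' : e = (s + 1) + (r.length : Int) := by
      simp only [List.length_cons] at he; push_cast at he; omega
    by_cases hx : x = 0 <;> cases in_b
    · -- x = 0, in_b = false : no-op step, runsF gains a false run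
      have hd : decide (x ≠ 0) = false := by simp [hx]
      have hb1 : ((x != 0) && !false) = false := by simp [hx]
      have hb2 : ((x == 0) && false) = false := by simp
      simp only [fwFinA, fwRunsF, hd, hb1, hb2, Bool.false_eq_true, if_false]
      rw [ih false bs (s + 1) e he']
      simp only [Bool.false_eq_true, if_false, fwEmit_false]
    · -- x = 0, in_b = true : the bout closes at s
      have hd : decide (x ≠ 0) = false := by simp [hx]
      have hb1 : ((x != 0) && !true) = false := by simp
      have hb2 : ((x == 0) && true) = true := by simp [hx]
      simp only [fwFinA, fwRunsF, hd, hb1, hb2, Bool.false_eq_true, if_false, if_true]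
      rw [ih false bs (s + 1) e he']
      simp only [Bool.false_eq_true, if_false]
      rw [fwConsRun_true_after_false]
      simp only [fwEmit]
      have hbs : bs + (s - bs) = s := by ring
      rw [hbs, fwEmit_false]
      simp
    · -- x ≠ 0, in_b = false : a bout opens at s
      have hd : decide (x ≠ 0) = true := by simp [hx]
      have hb1 : ((x != 0) && !false) = true := by simp [hx]
      simp only [fwFinA, fwRunsF, hd, hb1, if_true]
      rw [ih true s (s + 1) e he']
      have h1 : s + 1 - s = (1 : Int) := by ring
      simp [h1]
    · -- x ≠ 0, in_b = true : the run continues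
      have hd : decide (x ≠ 0) = true := by simp [hx]
      have hb1 : ((x != 0) && !true) = false := by simp
      have hb2 : ((x == 0) && true) = false := by simp [hx]
      simp only [fwFinA, fwRunsF, hd, hb1, hb2, Bool.false_eq_true, if_false]
      rw [ih true bs (s + 1) e he', fwConsRun_merge]
      have h1 : s + 1 - bs = s - bs + 1 := by ring
      simp [h1]

-- ===== VERDICT (by name: the statement is the Claim_ definition above) =====
theorem fw_get_bouts_spec : Claim_equal_fw_get_bouts := by
  intro wi fs mn _
  unfold Spec_fw_get_bouts fw_get_bouts fw_get_bouts_alt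
  rw [fwBuildRuns_nil]
  have h1 : (if (fwGoA mn fs ([], false, 0) 0 wi).2.1 && decide ((wi.length : Int) - (fwGoA mn fs ([], false, 0) 0 wi).2.2 ≥ mn)
      then (fwGoA mn fs ([], false, 0) 0 wi).1 ++ [((fwGoA mn fs ([], false, 0) 0 wi).2.2 * fs, (wi.length : Int) * fs)]
      else (fwGoA mn fs ([], false, 0) 0 wi).1) =
      (fwGoA mn fs ([], false, 0) 0 wi).1 ++
      (if (fwGoA mn fs ([], false, 0) 0 wi).2.1 && decide ((wi.length : Int) - (fwGoA mn fs ([], false, 0) 0 wi).2.2 ≥ mn)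
        then [((fwGoA mn fs ([], false, 0) 0 wi).2.2 * fs, (wi.length : Int) * fs)] else []) := by
    split <;> simp
  simp only [h1]
  rw [fwFinA_of_goA, fwFinA_emit mn fs wi false 0 0 (wi.length : Int) (by ring)]
  simp
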